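-- pv_equiv track=rewrite | github.com/Sherwin-xjtu/refMask | refs/extractFeatures1M.py | split_intervals
-- ===== SOURCE A (Python) =====
-- def split_intervals(start, end, interval_length):
--     intervals = []
--     # if end -start < 1000:
--     #     if start > 1000:
--     #         intervals.append([start - 1000, start -1])
--     #         intervals.append([start, end])
--     #         intervals.append([end + 1, 999])
--     current_start = start
--     current_end = start + interval_length - 1
--     while current_end <= end:
--         intervals.append([current_start, current_end])
--         current_start = current_end + 1
--         current_end = current_start + interval_length - 1
--     if current_start <= end:
--         intervals.append([current_start, end])
--     return intervals
-- ===== SOURCE B (Python) =====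
-- def split_intervals(start, end, interval_length):
--     # closed-form count: one divmod gives the number of full intervals and the
--     # remainder; full intervals are computed by index, the tail only if rem > 0
--     total = end - start + 1
--     if total <= 0:
--         return []
--     full, rem = divmod(total, interval_length)
--     intervals = [[start + i * interval_length, start + (i + 1) * interval_length - 1]
--                  for i in range(full)]
--     if rem:
--         intervals.append([start + full * interval_length, end])
--     return intervals
-- ===== Notes on version B (the rewrite author's own statement) =====
-- stated objective: alternative
-- what changed: Instead of A's while-loop that carries mutable current_start/current_end and tests each candidate interval against end, B computes the number of full intervals and the remainder in one closed-form divmod, builds the full intervals by index arithmetic, and appends the partial tail only when the remainder is nonzero.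
import Mathlib
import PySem

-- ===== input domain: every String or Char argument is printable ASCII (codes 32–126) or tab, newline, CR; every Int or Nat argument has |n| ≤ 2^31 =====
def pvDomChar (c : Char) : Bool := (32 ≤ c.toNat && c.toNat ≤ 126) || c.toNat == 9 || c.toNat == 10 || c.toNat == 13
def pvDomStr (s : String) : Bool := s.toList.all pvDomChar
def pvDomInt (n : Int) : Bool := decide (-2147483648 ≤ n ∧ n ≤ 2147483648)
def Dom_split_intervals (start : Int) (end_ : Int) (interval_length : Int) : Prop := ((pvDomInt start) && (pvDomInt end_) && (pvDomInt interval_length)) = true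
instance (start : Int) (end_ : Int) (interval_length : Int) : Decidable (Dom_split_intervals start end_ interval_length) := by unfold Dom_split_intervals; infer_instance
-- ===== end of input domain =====

-- B replaces A's while-loop with mutable interval state by one closed-form divmod
-- giving the count of full intervals, index-built blocks and an optional tail (alternative).


-- ===== PORT A =====
-- the while-loop of A; the '1 ≤ L' conjunct only makes the recursion total
-- (Python diverges on the inputs it cuts; such inputs are outside Pre_)
def splitLoop (end_ L cs ce : Int) (acc : List (List Int)) : List (List Int) :=
  if _h : ce ≤ end_ ∧ 1 ≤ L then
    splitLoop end_ L (ce + 1) (ce + 1 + L - 1) (acc ++ [[cs, ce]])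
  else if cs ≤ end_ then acc ++ [[cs, end_]] else acc
termination_by (end_ + 1 - ce).toNat
decreasing_by omega

def split_intervals (start : Int) (end_ : Int) (interval_length : Int) : List (List Int) :=
  splitLoop end_ interval_length start (start + interval_length - 1) []

-- ===== PORT B =====
def split_intervals_alt (start : Int) (end_ : Int) (interval_length : Int) : List (List Int) :=
  let total := end_ - start + 1
  if total ≤ 0 then []
  else
    let full := PySem.Int.floordiv total interval_length
    let rem := PySem.Int.mod total interval_length
    let intervals := (PySem.List.pyRange 0 full 1).map
      (fun i => [start + i * interval_length, start + (i + 1) * interval_length - 1])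
    if rem ≠ 0 then intervals ++ [[start + full * interval_length, end_]] else intervals

-- ===== PRECONDITION & SPEC =====
-- Pre_ excludes exactly the inputs on which Python A loops forever
-- (interval_length ≤ 0 with start + interval_length - 1 ≤ end); on every input
-- where A terminates the claim applies.
def Pre_split_intervals (start : Int) (end_ : Int) (interval_length : Int) : Prop :=
  1 ≤ interval_length ∨ end_ < start + interval_length - 1
instance (start : Int) (end_ : Int) (interval_length : Int) : Decidable (Pre_split_intervals start end_ interval_length) := by unfold Pre_split_intervals; infer_instance

def pvWitness_split_intervals : Int × Int × Int := (1, 10, 3)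

def Spec_split_intervals (start : Int) (end_ : Int) (interval_length : Int) (out : List (List Int)) : Prop := out = split_intervals_alt start end_ interval_length
instance (start : Int) (end_ : Int) (interval_length : Int) (out : List (List Int)) : Decidable (Spec_split_intervals start end_ interval_length out) := by unfold Spec_split_intervals; infer_instance

-- ===== CLAIM (what is proved, stated in full; the proofs are below) =====
def Claim_equal_split_intervals : Prop := ∀ (start : Int) (end_ : Int) (interval_length : Int), Dom_split_intervals start end_ interval_length → Pre_split_intervals start end_ interval_length → Spec_split_intervals start end_ interval_length (split_intervals start end_ interval_length)

-- ===== LEMMAS AND PROOFS =====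

-- unrolling B's closed form one full interval at a time
theorem alt_step (cs end_ L : Int) (hL : 1 ≤ L) (h : cs + L - 1 ≤ end_) :
    split_intervals_alt cs end_ L
      = [cs, cs + L - 1] :: split_intervals_alt (cs + L) end_ L := by
  have hL0 : (0:Int) < L := by omega
  have hT : ¬ end_ - cs + 1 ≤ 0 := by omega
  unfold split_intervals_alt
  simp only [if_neg hT,
    PySem.Int.floordiv_eq_ediv_of_pos hL0, PySem.Int.mod_eq_emod_of_pos hL0,
    PySem.List.pyRange_one]
  have hfull1 : 1 ≤ (end_ - cs + 1) / L := by
    rw [Int.le_ediv_iff_mul_le hL0]; omega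
  by_cases h2 : end_ - (cs + L) + 1 ≤ 0
  · -- exactly one full interval: total = L
    have hTL : end_ - cs + 1 = L := by omega
    rw [hTL, if_pos h2, Int.ediv_self (by omega : L ≠ 0), Int.emod_self]
    norm_num
  · simp only [if_neg h2]
    have hdiv : (end_ - (cs + L) + 1) / L = (end_ - cs + 1) / L - 1 := by
      have := Int.add_mul_ediv_right (end_ - (cs + L) + 1) 1 (by omega : L ≠ 0)
      rw [one_mul] at this
      have e : end_ - (cs + L) + 1 + L = end_ - cs + 1 := by ring
      rw [e] at this; omega
    have hmod : (end_ - (cs + L) + 1) % L = (end_ - cs + 1) % L := by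
      have e : end_ - (cs + L) + 1 = (end_ - cs + 1) - L := by ring
      rw [e, Int.sub_emod_right]
    rw [hdiv, hmod]
    set q := (end_ - cs + 1) / L with hq
    have hn : q.toNat = (q - 1).toNat + 1 := by omega
    have hsub : (q - 0).toNat = q.toNat := by omega
    have hsub' : (q - 1 - 0).toNat = (q - 1).toNat := by omega
    rw [hsub, hsub', hn, List.range_succ_eq_map]
    simp only [List.map_cons, List.map_map]
    by_cases hr : (end_ - cs + 1) % L ≠ 0
    · simp only [if_pos hr, List.cons_append]
      congr 1
      · push_cast; ring_nf
      congr 1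
      · apply List.map_congr_left; intro k _
        simp only [Function.comp_apply]; push_cast; norm_num; constructor <;> ring
      · have : cs + q * L = cs + L + (q - 1) * L := by ring
        simp [this]
    · simp only [if_neg hr, List.cons_append]
      congr 1
      · push_cast; ring_nf
      · apply List.map_congr_left; intro k _
        simp only [Function.comp_apply]; push_cast; norm_num; constructor <;> ring

theorem alt_small (cs end_ L : Int) (hL : 1 ≤ L) (h : ¬ cs + L - 1 ≤ end_) (h2 : cs ≤ end_) :
    split_intervals_alt cs end_ L = [[cs, end_]] := by
  have hL0 : (0:Int) < L := by omega
  have hT : ¬ end_ - cs + 1 ≤ 0 := by omega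
  unfold split_intervals_alt
  simp only [if_neg hT,
    PySem.Int.floordiv_eq_ediv_of_pos hL0, PySem.Int.mod_eq_emod_of_pos hL0]
  have hdiv : (end_ - cs + 1) / L = 0 := Int.ediv_eq_zero_of_lt (by omega) (by omega)
  have hmod : (end_ - cs + 1) % L = end_ - cs + 1 := Int.emod_eq_of_lt (by omega) (by omega)
  rw [hdiv, hmod]
  simp [show end_ - cs + 1 ≠ 0 by omega]

theorem alt_empty (cs end_ L : Int) (h2 : end_ < cs) :
    split_intervals_alt cs end_ L = [] := by
  unfold split_intervals_alt
  simp [show end_ - cs + 1 ≤ 0 by omega]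

theorem splitLoop_eq_alt (end_ L : Int) (hL : 1 ≤ L) (cs : Int) (acc : List (List Int)) :
    splitLoop end_ L cs (cs + L - 1) acc = acc ++ split_intervals_alt cs end_ L := by
  rw [splitLoop]
  by_cases h : cs + L - 1 ≤ end_
  · rw [dif_pos ⟨h, hL⟩]
    have e1 : cs + L - 1 + 1 = cs + L := by ring
    rw [e1, splitLoop_eq_alt end_ L hL (cs + L) (acc ++ [[cs, cs + L - 1]]),
        alt_step cs end_ L hL h]
    simp
  · rw [dif_neg (by omega)]
    by_cases h2 : cs ≤ end_
    · rw [if_pos h2, alt_small cs end_ L hL h h2]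
    · rw [if_neg h2, alt_empty cs end_ L (by omega)]; simp
termination_by (end_ + 1 - cs).toNat
decreasing_by omega

-- ===== VERDICT (by name: the statement is the Claim_ definition above) =====
theorem split_intervals_spec : Claim_equal_split_intervals := by
  intro start end_ L _hDom hPre
  unfold Spec_split_intervals split_intervals
  by_cases hL : 1 ≤ L
  · exact splitLoop_eq_alt end_ L hL start []
  · -- interval_length ≤ 0: Pre_ forces end_ < start + L - 1, so the loop guard
    -- and the tail test both fail and both programs return []
    have hlt : end_ < start + L - 1 := hPre.resolve_left hL
    rw [splitLoop, dif_neg (by rintro ⟨_, h⟩; omega), if_neg (by omega),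
        alt_empty start end_ L (by omega)]
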